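-- pv_equiv track=rewrite | github.com/melik-a/longest_non_increasing_subseq | monot_non_incr_subseq.py | len_of_max_non_incr_sub_seq
-- ===== SOURCE A (Python) =====
-- def len_of_max_non_incr_sub_seq(sequence):
--     max_sub_seq = 1
--     curr_sub_seq = 1
--     for i in range(len(sequence) - 1):
--         if sequence[i] >= sequence[i + 1]:
--             curr_sub_seq += 1
--             if curr_sub_seq > max_sub_seq:
--                 max_sub_seq = curr_sub_seq
--         else:
--             curr_sub_seq = 1
--     return max_sub_seq
-- ===== SOURCE B (Python) =====
-- def len_of_max_non_incr_sub_seq(sequence):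
--     n = len(sequence)
--     breaks = [i for i in range(n - 1) if sequence[i] < sequence[i + 1]]
--     best = 1
--     prev = -1
--     for b in breaks + [n - 1]:
--         if b - prev > best:
--             best = b - prev
--         prev = b
--     return best
-- ===== Notes on version B (the rewrite author's own statement) =====
-- stated objective: alternative
-- what changed: Replaces A's single-pass running-counter/running-max with a two-phase decomposition: first build the list of break indices where sequence[i] < sequence[i+1], then maximize the gaps between consecutive boundary points ([-1] + breaks + [n-1]).
import Mathlib
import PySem

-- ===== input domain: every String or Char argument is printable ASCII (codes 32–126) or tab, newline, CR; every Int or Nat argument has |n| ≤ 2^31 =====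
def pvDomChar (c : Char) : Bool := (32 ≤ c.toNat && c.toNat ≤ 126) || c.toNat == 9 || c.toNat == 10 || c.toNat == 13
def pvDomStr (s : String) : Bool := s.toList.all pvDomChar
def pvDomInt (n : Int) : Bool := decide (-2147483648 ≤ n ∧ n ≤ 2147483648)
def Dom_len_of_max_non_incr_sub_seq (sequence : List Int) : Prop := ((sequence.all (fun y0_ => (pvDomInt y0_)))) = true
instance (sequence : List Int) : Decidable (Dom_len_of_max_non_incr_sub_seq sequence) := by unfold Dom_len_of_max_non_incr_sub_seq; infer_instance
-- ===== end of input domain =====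

-- B replaces A's single running-counter pass by a break-index table plus a gap-maximization
-- pass over boundary points (alternative decomposition, same return value).


-- ===== PORT A =====
def len_of_max_non_incr_sub_seq (sequence : List Int) : Int :=
  ((PySem.List.pyRange 0 ((sequence.length : Int) - 1) 1).foldl
    (fun (st : Int × Int) i =>
      if PySem.List.pyGetD sequence i 0 ≥ PySem.List.pyGetD sequence (i + 1) 0 then
        let cur := st.2 + 1
        (if cur > st.1 then cur else st.1, cur)
      else (st.1, 1))
    (1, 1)).1

-- ===== PORT B =====
def len_of_max_non_incr_sub_seq_alt (sequence : List Int) : Int :=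
  let n : Int := sequence.length
  let breaks := (PySem.List.pyRange 0 (n - 1) 1).filter
    (fun i => PySem.List.pyGetD sequence i 0 < PySem.List.pyGetD sequence (i + 1) 0)
  ((breaks ++ [n - 1]).foldl
    (fun (st : Int × Int) b => (if b - st.2 > st.1 then b - st.2 else st.1, b))
    (1, -1)).1

-- ===== PRECONDITION & SPEC =====
def Spec_len_of_max_non_incr_sub_seq (sequence : List Int) (out : Int) : Prop := out = len_of_max_non_incr_sub_seq_alt sequence
instance (sequence : List Int) (out : Int) : Decidable (Spec_len_of_max_non_incr_sub_seq sequence out) := by unfold Spec_len_of_max_non_incr_sub_seq; infer_instance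

-- ===== CLAIM (what is proved, stated in full; the proofs are below) =====
def Claim_equal_len_of_max_non_incr_sub_seq : Prop := ∀ (sequence : List Int), Dom_len_of_max_non_incr_sub_seq sequence → Spec_len_of_max_non_incr_sub_seq sequence (len_of_max_non_incr_sub_seq sequence)

-- ===== LEMMAS AND PROOFS =====

-- A's loop body and B's gap-maximization body, named for the proofs.
def pvAstep (s : List Int) (st : Int × Int) (i : Int) : Int × Int :=
  if PySem.List.pyGetD s i 0 ≥ PySem.List.pyGetD s (i + 1) 0 then
    (if st.2 + 1 > st.1 then st.2 + 1 else st.1, st.2 + 1)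
  else (st.1, 1)

def pvBstep (st : Int × Int) (b : Int) : Int × Int :=
  (if b - st.2 > st.1 then b - st.2 else st.1, b)

def pvBrk (s : List Int) (k : Int) : List Int :=
  (PySem.List.pyRange 0 k 1).filter
    (fun i => PySem.List.pyGetD s i 0 < PySem.List.pyGetD s (i + 1) 0)

-- the central invariant: after the first k comparison steps, A's (max, cur) state is
-- determined by B's gap fold over the breaks below k, closed off at boundary k.
lemma pv_invariant (s : List Int) (k : Nat) :
    (PySem.List.pyRange 0 (k : Int) 1).foldl (pvAstep s) (1, 1)
      = ((pvBstep ((pvBrk s k).foldl pvBstep (1, -1)) k).1,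
         (k : Int) - ((pvBrk s k).foldl pvBstep (1, -1)).2)
    ∧ 1 ≤ ((pvBrk s k).foldl pvBstep (1, -1)).1
    ∧ ((pvBrk s k).foldl pvBstep (1, -1)).2 < (k : Int) := by
  induction k with
  | zero =>
      simp [pvBrk, pvBstep]
  | succ k ih =>
      obtain ⟨hA, hge, hlt⟩ := ih
      obtain ⟨m, p, hst⟩ : ∃ m p, (pvBrk s (k : Int)).foldl pvBstep (1, -1) = (m, p) :=
        ⟨_, _, rfl⟩
      rw [hst] at hA hge hlt
      have hrange : PySem.List.pyRange 0 ((k + 1 : Nat) : Int) 1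
          = PySem.List.pyRange 0 (k : Int) 1 ++ [(k : Int)] := by
        push_cast
        exact PySem.List.pyRange_one_succ_right (by positivity)
      have hbrk : pvBrk s ((k + 1 : Nat) : Int)
          = pvBrk s (k : Int)
            ++ (if PySem.List.pyGetD s (k : Int) 0 < PySem.List.pyGetD s ((k : Int) + 1) 0
                then [(k : Int)] else []) := by
        unfold pvBrk
        rw [hrange, List.filter_append]
        simp only [List.filter_cons, List.filter_nil, decide_eq_true_eq]
      rw [hrange, List.foldl_append, hA, hbrk, List.foldl_append, hst]
      by_cases h : PySem.List.pyGetD s (k : Int) 0 < PySem.List.pyGetD s ((k : Int) + 1) 0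
      · -- break at k: A resets its counter, B records boundary k
        rw [if_pos h]
        simp only [List.foldl_cons, List.foldl_nil, pvAstep, pvBstep]
        push_cast
        split_ifs <;> (try simp only [Prod.mk.injEq, true_and]) <;> omega
      · -- no break at k: A extends the current run, the break list is unchanged
        rw [if_neg h]
        simp only [List.foldl_cons, List.foldl_nil, pvAstep, pvBstep]
        push_cast
        split_ifs <;> (try simp only [Prod.mk.injEq, true_and]) <;> omega

-- ===== VERDICT (by name: the statement is the Claim_ definition above) =====
theorem len_of_max_non_incr_sub_seq_spec : Claim_equal_len_of_max_non_incr_sub_seq := by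
  intro s _
  unfold Spec_len_of_max_non_incr_sub_seq
  cases s with
  | nil => decide
  | cons x xs =>
      have hn : (((x :: xs).length : Int) - 1) = ((xs.length : Nat) : Int) := by
        push_cast [List.length_cons]; ring
      show ((PySem.List.pyRange 0 (((x :: xs).length : Int) - 1) 1).foldl
              (pvAstep (x :: xs)) (1, 1)).1
          = ((pvBrk (x :: xs) (((x :: xs).length : Int) - 1)
              ++ [((x :: xs).length : Int) - 1]).foldl pvBstep (1, -1)).1
      rw [hn, List.foldl_append]
      simp only [List.foldl_cons, List.foldl_nil]
      rw [(pv_invariant (x :: xs) xs.length).1]
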